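-- pv_equiv track=rewrite | github.com/HackRx-6/Vector-space | ROUND_6/find_almost_equal_index.py | find_almost_equal_index
-- ===== SOURCE A (Python) =====
-- def find_almost_equal_index(s, pattern):
--     n, m = len(s), len(pattern)
--     for i in range(n - m + 1):
--         mismatch = 0
--         for j in range(m):
--             if s[i + j] != pattern[j]:
--                 mismatch += 1
--                 if mismatch > 1:
--                     break
--         if mismatch <= 1:
--             return i
--     return -1
-- ===== SOURCE B (Python) =====
-- def _lcp(a, b):
--     k = 0
--     for x, y in zip(a, b):
--         if x != y:
--             break
--         k += 1
--     return k
--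
--
-- def find_almost_equal_index(s, pattern):
--     n, m = len(s), len(pattern)
--     for i in range(n - m + 1):
--         window = s[i:i + m]
--         k = _lcp(window, pattern)
--         if k == m or window[k + 1:] == pattern[k + 1:]:
--             return i
--     return -1
-- ===== Notes on version B (the rewrite author's own statement) =====
-- stated objective: alternative
-- what changed: Per window, A counts mismatches with a counter and an early break; B instead slices the window, computes its longest common prefix with the pattern, and accepts iff the prefix covers the pattern or the suffixes after the first mismatch are exactly equal.
import Mathlib
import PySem

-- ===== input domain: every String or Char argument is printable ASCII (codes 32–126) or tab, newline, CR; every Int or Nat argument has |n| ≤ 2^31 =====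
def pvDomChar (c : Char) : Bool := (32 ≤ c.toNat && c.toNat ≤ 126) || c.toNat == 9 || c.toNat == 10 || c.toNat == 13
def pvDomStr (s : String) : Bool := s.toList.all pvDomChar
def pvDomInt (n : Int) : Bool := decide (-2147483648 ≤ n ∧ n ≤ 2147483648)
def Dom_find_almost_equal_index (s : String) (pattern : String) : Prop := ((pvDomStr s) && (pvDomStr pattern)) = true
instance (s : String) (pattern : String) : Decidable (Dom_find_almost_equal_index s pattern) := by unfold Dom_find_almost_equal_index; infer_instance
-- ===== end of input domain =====

-- B re-decomposes each window check as longest-common-prefix + suffix equality instead of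
-- A's mismatch counter with early break (objective: alternative; same asymptotic cost).

-- ===== PORT A =====
-- inner loop 'for j in range(m): …' with the break encoded as an early return of the counter
def pvAInner (sl pl : List Char) (i : Int) : List Int → Nat → Nat
  | [], mismatch => mismatch
  | j :: js, mismatch =>
    if PySem.List.pyGet? sl (i + j) ≠ PySem.List.pyGet? pl j then
      if mismatch + 1 > 1 then mismatch + 1
      else pvAInner sl pl i js (mismatch + 1)
    else pvAInner sl pl i js mismatch

-- outer loop 'for i in range(n - m + 1): …' with the early 'return i'
def pvAOuter (sl pl : List Char) : List Int → Int
  | [] => -1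
  | i :: is =>
    if pvAInner sl pl i (PySem.List.pyRange 0 (pl.length : Int) 1) 0 ≤ 1 then i
    else pvAOuter sl pl is

def find_almost_equal_index (s : String) (pattern : String) : Int :=
  let sl := s.toList
  let pl := pattern.toList
  pvAOuter sl pl (PySem.List.pyRange 0 ((sl.length : Int) - (pl.length : Int) + 1) 1)

-- ===== PORT B =====
-- _lcp: length of the longest common prefix (zip with break)
def pvLcp : List Char → List Char → Nat
  | x :: xs, y :: ys => if x = y then pvLcp xs ys + 1 else 0
  | _, _ => 0

def pvBOuter (sl pl : List Char) : List Int → Int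
  | [] => -1
  | i :: is =>
    let window := PySem.List.slice sl (some i) (some (i + (pl.length : Int)))
    let k := pvLcp window pl
    if k = pl.length ∨ window.drop (k + 1) = pl.drop (k + 1) then i
    else pvBOuter sl pl is

def find_almost_equal_index_alt (s : String) (pattern : String) : Int :=
  let sl := s.toList
  let pl := pattern.toList
  pvBOuter sl pl (PySem.List.pyRange 0 ((sl.length : Int) - (pl.length : Int) + 1) 1)

-- ===== PRECONDITION & SPEC =====
def Spec_find_almost_equal_index (s : String) (pattern : String) (out : Int) : Prop := out = find_almost_equal_index_alt s pattern
instance (s : String) (pattern : String) (out : Int) : Decidable (Spec_find_almost_equal_index s pattern out) := by unfold Spec_find_almost_equal_index; infer_instance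

-- ===== CLAIM (what is proved, stated in full; the proofs are below) =====
def Claim_equal_find_almost_equal_index : Prop := ∀ (s : String) (pattern : String), Dom_find_almost_equal_index s pattern → Spec_find_almost_equal_index s pattern (find_almost_equal_index s pattern)

-- ===== LEMMAS AND PROOFS =====

-- reference model for A's inner loop: walk the window and the pattern in parallel
def pvCnt2 : List Char → List Char → Nat → Nat
  | x :: xs, y :: ys, c =>
    if x ≠ y then (if c + 1 > 1 then c + 1 else pvCnt2 xs ys (c + 1))
    else pvCnt2 xs ys c
  | _, _, c => c

lemma pvAInner_eq_cnt2 (sl pl : List Char) (i : Int) (hi : 0 ≤ i)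
    (hin : i.toNat + pl.length ≤ sl.length) :
    ∀ d t c, t + d = pl.length →
      pvAInner sl pl i (PySem.List.pyRange (t : Int) (pl.length : Int) 1) c
        = pvCnt2 (((sl.drop i.toNat).take pl.length).drop t) (pl.drop t) c := by
  intro d
  induction d with
  | zero =>
    intro t c ht
    have ht' : t = pl.length := by omega
    subst ht'
    rw [PySem.List.pyRange_one_eq_nil (le_refl _)]
    rw [List.drop_eq_nil_of_le (le_refl _)]
    cases ((sl.drop i.toNat).take pl.length).drop pl.length <;> simp [pvAInner, pvCnt2]
  | succ d ih =>
    intro t c ht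
    have htlt : t < pl.length := by omega
    have hw : ((sl.drop i.toNat).take pl.length).length = pl.length := by
      simp; omega
    have hwt : t < ((sl.drop i.toNat).take pl.length).length := by omega
    rw [PySem.List.pyRange_one_cons (by exact_mod_cast htlt)]
    rw [List.drop_eq_getElem_cons hwt, List.drop_eq_getElem_cons htlt]
    have hcast : (t : Int) + 1 = ((t + 1 : Nat) : Int) := by push_cast; ring
    have hg1 : PySem.List.pyGet? sl (i + (t : Int)) = some (((sl.drop i.toNat).take pl.length)[t]'hwt) := by
      have h1 : i + (t : Int) = ((i.toNat + t : Nat) : Int) := by omega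
      have hlt : i.toNat + t < sl.length := by omega
      rw [h1, PySem.List.pyGet?_natCast, List.getElem?_eq_getElem hlt]
      congr 1
      rw [List.getElem_take, List.getElem_drop]
    have hg2 : PySem.List.pyGet? pl (t : Int) = some (pl[t]'htlt) := by
      rw [PySem.List.pyGet?_natCast, List.getElem?_eq_getElem htlt]
    simp only [pvAInner, pvCnt2, hg1, hg2, hcast, ne_eq, Option.some.injEq]
    split_ifs with h1 h2
    · exact ih (t + 1) c (by omega)
    · rfl
    · exact ih (t + 1) (c + 1) (by omega)

lemma pvCnt2_one_le_iff (u v : List Char) (h : u.length = v.length) :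
    pvCnt2 u v 1 ≤ 1 ↔ u = v := by
  induction u generalizing v with
  | nil => cases v with
    | nil => simp [pvCnt2]
    | cons y ys => simp at h
  | cons x xs ih =>
    cases v with
    | nil => simp at h
    | cons y ys =>
      by_cases hxy : x = y
      · subst hxy
        simpa [pvCnt2] using ih ys (by simpa using h)
      · simp [pvCnt2, hxy]

lemma pvCnt2_le_iff (u v : List Char) (h : u.length = v.length) :
    pvCnt2 u v 0 ≤ 1 ↔
      (pvLcp u v = v.length ∨ u.drop (pvLcp u v + 1) = v.drop (pvLcp u v + 1)) := by
  induction u generalizing v with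
  | nil => cases v with
    | nil => simp [pvCnt2, pvLcp]
    | cons y ys => simp at h
  | cons x xs ih =>
    cases v with
    | nil => simp at h
    | cons y ys =>
      by_cases hxy : x = y
      · subst hxy
        have := ih ys (by simpa using h)
        simpa [pvCnt2, pvLcp] using this
      · have := pvCnt2_one_le_iff xs ys (by simpa using h)
        simp [pvCnt2, pvLcp, hxy, this]

lemma pvOuter_eq (sl pl : List Char) :
    ∀ il : List Int, (∀ i ∈ il, 0 ≤ i ∧ i.toNat + pl.length ≤ sl.length) →
      pvAOuter sl pl il = pvBOuter sl pl il := by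
  intro il
  induction il with
  | nil => intro _; rfl
  | cons i is ih =>
    intro h
    obtain ⟨hi, hin⟩ := h i (List.mem_cons_self ..)
    have hw : PySem.List.slice sl (some i) (some (i + (pl.length : Int)))
        = (sl.drop i.toNat).take pl.length := by
      rw [PySem.List.slice_toNat _ hi (by omega)]
      congr 1
      omega
    have hwlen : ((sl.drop i.toNat).take pl.length).length = pl.length := by
      simp; omega
    have hA := pvAInner_eq_cnt2 sl pl i hi hin pl.length 0 0 (by omega)
    simp only [Nat.cast_zero, List.drop_zero] at hA
    have hcond := (hA ▸ pvCnt2_le_iff ((sl.drop i.toNat).take pl.length) pl hwlen :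
      pvAInner sl pl i (PySem.List.pyRange 0 (pl.length : Int) 1) 0 ≤ 1 ↔ _)
    simp only [pvAOuter, pvBOuter, hw]
    split_ifs with h1 h2 h2
    · rfl
    · exact absurd (hcond.mp h1) h2
    · exact absurd (hcond.mpr h2) h1
    · exact ih (fun j hj => h j (List.mem_cons_of_mem _ hj))

-- ===== VERDICT (by name: the statement is the Claim_ definition above) =====
theorem find_almost_equal_index_spec : Claim_equal_find_almost_equal_index := by
  intro s pattern _
  unfold Spec_find_almost_equal_index
  unfold find_almost_equal_index find_almost_equal_index_alt
  refine pvOuter_eq s.toList pattern.toList _ ?_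
  intro i hmem
  rw [PySem.List.mem_pyRange_one] at hmem
  refine ⟨hmem.1, ?_⟩
  omega
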